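-- pv_equiv track=rewrite | github.com/yabincui/topcoder | SetMetric.py | nearness
-- ===== SOURCE A (Python) =====
-- def nearness(target, candidate):
-- 	target = sorted(target)
-- 	candidate = sorted(candidate)
-- 	m = len(target)
-- 	n = len(candidate)
-- 	dp = [[0 for x in range(n+1)] for x in range(m+1)]
-- 	for i in range(1, m+1):
-- 		for j in range(i, n+1):
-- 			# Match i with j - 1.
-- 			dp[i][j] = int(1e9)
-- 			if j > i:
-- 				dp[i][j] = min(dp[i][j], dp[i][j-1])
-- 			dp[i][j] = min(dp[i][j], dp[i-1][j-1] + abs(target[i-1] - candidate[j-1]))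
-- 	return dp[m][n]
-- ===== SOURCE B (Python) =====
-- def nearness(target, candidate):
-- 	t = sorted(target)
-- 	c = sorted(candidate)
-- 	m = len(t)
-- 	n = len(c)
-- 	if n < m:
-- 		# A's table leaves dp[m][n] untouched when no full matching exists
-- 		return 0
-- 	memo = {}
-- 	def f(i, j):
-- 		# min cost of matching the first i targets within the first j candidates
-- 		if i == 0:
-- 			return 0
-- 		if j < i:
-- 			return int(1e9)
-- 		if (i, j) not in memo:
-- 			memo[(i, j)] = min(f(i, j - 1), f(i - 1, j - 1) + abs(t[i - 1] - c[j - 1]))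
-- 		return memo[(i, j)]
-- 	return f(m, n)
-- ===== Notes on version B (the rewrite author's own statement) =====
-- stated objective: alternative
-- what changed: Replaces the bottom-up 2D table fill with a top-down memoized recursion f(i,j)=min(f(i,j-1), f(i-1,j-1)+cost), touching only reachable states; the n<m case (where A's table cell stays 0) is returned directly.
import Mathlib
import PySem

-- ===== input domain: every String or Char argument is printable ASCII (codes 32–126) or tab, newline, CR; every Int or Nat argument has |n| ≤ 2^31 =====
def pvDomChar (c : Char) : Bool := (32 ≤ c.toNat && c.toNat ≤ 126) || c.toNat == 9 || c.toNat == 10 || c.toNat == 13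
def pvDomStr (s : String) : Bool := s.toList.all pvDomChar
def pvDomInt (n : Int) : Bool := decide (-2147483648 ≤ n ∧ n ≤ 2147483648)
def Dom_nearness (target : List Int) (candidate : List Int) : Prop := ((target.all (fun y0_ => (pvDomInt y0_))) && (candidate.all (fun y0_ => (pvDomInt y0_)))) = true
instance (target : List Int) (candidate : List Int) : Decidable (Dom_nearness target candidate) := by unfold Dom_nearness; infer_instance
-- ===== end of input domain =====

-- B replaces A's bottom-up 2D table fill by a top-down recursion on (i, j) over the
-- same sorted lists (memoized in the Python; plain structural recursion here); same
-- return value everywhere, including the n < m case where A's table cell stays 0.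

-- ===== PORT A =====
-- dp[i][j] read/write helpers; the Python only ever indexes inside the table, so the getD defaults are never hit.
def get2 (dp : List (List Int)) (i j : Nat) : Int := (dp.getD i []).getD j 0

def set2 (dp : List (List Int)) (i j : Nat) (v : Int) : List (List Int) :=
  dp.set i ((dp.getD i []).set j v)

-- body of A's inner loop: the three sequential updates of dp[i][j]
def bodyA (t c : List Int) (i : Nat) (dp : List (List Int)) (j : Nat) : List (List Int) :=
  let dp1 := set2 dp i j (10 ^ 9)
  let dp2 := if i < j then set2 dp1 i j (min (get2 dp1 i j) (get2 dp1 i (j - 1))) else dp1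
  set2 dp2 i j (min (get2 dp2 i j) (get2 dp2 (i - 1) (j - 1) + |t.getD (i - 1) 0 - c.getD (j - 1) 0|))

-- `range(1, m+1)` / `range(i, n+1)` have Nat bounds here, so List.range' is exact.
def nearness (target : List Int) (candidate : List Int) : Int :=
  let t := PySem.List.sorted target (fun x => x) false
  let c := PySem.List.sorted candidate (fun x => x) false
  let m := t.length
  let n := c.length
  let dp0 := List.replicate (m + 1) (List.replicate (n + 1) (0 : Int))
  let dp := (List.range' 1 m).foldl
    (fun dp i => (List.range' i (n + 1 - i)).foldl (bodyA t c i) dp) dp0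
  get2 dp m n

-- ===== PORT B =====
-- f(i, j) from Source B: min cost of matching the first i sorted targets within the first j
-- sorted candidates (Source B memoizes f with a dict; the recursion itself is identical).
def fB (t c : List Int) : Nat → Nat → Int
  | 0, _ => 0
  | i + 1, j =>
    if j < i + 1 then 10 ^ 9
    else min (fB t c (i + 1) (j - 1)) (fB t c i (j - 1) + |t.getD i 0 - c.getD (j - 1) 0|)
termination_by i j => (i, j)
decreasing_by
  · have hj : j - 1 < j := by omega
    exact Prod.Lex.right _ hj
  · exact Prod.Lex.left _ _ (by omega)

def nearness_alt (target : List Int) (candidate : List Int) : Int :=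
  let t := PySem.List.sorted target (fun x => x) false
  let c := PySem.List.sorted candidate (fun x => x) false
  let m := t.length
  let n := c.length
  if n < m then 0 else fB t c m n

-- ===== PRECONDITION & SPEC =====
def Spec_nearness (target : List Int) (candidate : List Int) (out : Int) : Prop := out = nearness_alt target candidate
instance (target : List Int) (candidate : List Int) (out : Int) : Decidable (Spec_nearness target candidate out) := by unfold Spec_nearness; infer_instance

-- ===== CLAIM (what is proved, stated in full; the proofs are below) =====
def Claim_equal_nearness : Prop := ∀ (target : List Int) (candidate : List Int), Dom_nearness target candidate → Spec_nearness target candidate (nearness target candidate)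

-- ===== LEMMAS AND PROOFS =====

-- table invariant: rows < k are fully processed, row k is processed for columns < jd;
-- a processed in-range cell (i, j) holds fB t c i j, every other cell is still 0
def TabInv (t c : List Int) (k jd : Nat) (dp : List (List Int)) : Prop :=
  dp.length = t.length + 1 ∧
  (∀ i, i ≤ t.length → (dp.getD i []).length = c.length + 1) ∧
  ∀ i j, i ≤ t.length → j ≤ c.length →
    get2 dp i j =
      if 1 ≤ i ∧ (i < k ∧ i ≤ j ∨ i = k ∧ i ≤ j ∧ j < jd) then fB t c i j else 0

theorem fB_zero (t c : List Int) (j : Nat) : fB t c 0 j = 0 := by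
  simp [fB]

theorem fB_succ (t c : List Int) (i j : Nat) :
    fB t c (i + 1) j =
      if j < i + 1 then 10 ^ 9
      else min (fB t c (i + 1) (j - 1)) (fB t c i (j - 1) + |t.getD i 0 - c.getD (j - 1) 0|) := by
  rw [fB]

theorem fB_le (t c : List Int) (i j : Nat) (hi : 1 ≤ i) (hij : i ≤ j) :
    fB t c i j ≤ 10 ^ 9 := by
  obtain ⟨i0, rfl⟩ : ∃ i0, i = i0 + 1 := ⟨i - 1, by omega⟩
  induction j, hij using Nat.le_induction with
  | base =>
    rw [fB_succ, if_neg (by omega)]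
    have h9 : fB t c (i0 + 1) (i0 + 1 - 1) = 10 ^ 9 := by
      rw [fB_succ, if_pos (by omega)]
    calc min (fB t c (i0 + 1) (i0 + 1 - 1)) _ ≤ fB t c (i0 + 1) (i0 + 1 - 1) := min_le_left _ _
      _ = 10 ^ 9 := h9
  | succ j hj ih =>
    rw [fB_succ, if_neg (by omega)]
    calc min (fB t c (i0 + 1) (j + 1 - 1)) _ ≤ fB t c (i0 + 1) (j + 1 - 1) := min_le_left _ _
      _ = fB t c (i0 + 1) j := by norm_num
      _ ≤ 10 ^ 9 := ih

theorem length_set2 (dp : List (List Int)) (i j : Nat) (v : Int) :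
    (set2 dp i j v).length = dp.length := by
  simp [set2]

theorem row_set2_self (dp : List (List Int)) (i j : Nat) (v : Int) (hi : i < dp.length) :
    (set2 dp i j v).getD i [] = (dp.getD i []).set j v := by
  simp [set2, List.getD, List.getElem?_set_self hi]

theorem row_set2_ne (dp : List (List Int)) (i j i' : Nat) (v : Int) (h : i ≠ i') :
    (set2 dp i j v).getD i' [] = dp.getD i' [] := by
  simp [set2, List.getD, List.getElem?_set_ne h]

theorem get2_set2_same (dp : List (List Int)) (i j : Nat) (v : Int)
    (hi : i < dp.length) (hj : j < (dp.getD i []).length) :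
    get2 (set2 dp i j v) i j = v := by
  rw [get2, row_set2_self dp i j v hi, List.getD,
    List.getElem?_set_self (by simpa using hj)]
  rfl

theorem get2_set2_ne (dp : List (List Int)) (i j i' j' : Nat) (v : Int)
    (hi : i < dp.length) (h : i ≠ i' ∨ j ≠ j') :
    get2 (set2 dp i j v) i' j' = get2 dp i' j' := by
  by_cases hii : i = i'
  · subst hii
    have hjj : j ≠ j' := by tauto
    rw [get2, row_set2_self dp i j v hi, get2, List.getD, List.getD,
      List.getElem?_set_ne hjj]
    rfl
  · rw [get2, row_set2_ne dp i j i' v hii, get2]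

theorem set2_set2 (dp : List (List Int)) (i j : Nat) (u v : Int) (hi : i < dp.length) :
    set2 (set2 dp i j u) i j v = set2 dp i j v := by
  rw [set2, row_set2_self dp i j u hi, List.set_set, set2, List.set_set]
  rfl

theorem bodyA_eq (t c : List Int) (i j : Nat) (dp : List (List Int))
    (hi : 1 ≤ i) (hij : i ≤ j) (hlen : i < dp.length) (hrow : j < (dp.getD i []).length) :
    bodyA t c i dp j =
      set2 dp i j (min (if i < j then min (10 ^ 9) (get2 dp i (j - 1)) else 10 ^ 9)
        (get2 dp (i - 1) (j - 1) + |t.getD (i - 1) 0 - c.getD (j - 1) 0|)) := by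
  have hg1 : get2 (set2 dp i j (10 ^ 9)) i j = 10 ^ 9 := get2_set2_same dp i j _ hlen hrow
  have hg1' : get2 (set2 dp i j (10 ^ 9)) i (j - 1) = get2 dp i (j - 1) :=
    get2_set2_ne dp i j i (j - 1) _ hlen (Or.inr (by omega))
  rw [bodyA]
  by_cases hlt : i < j
  · simp only [if_pos hlt, hg1, hg1']
    rw [set2_set2 dp i j _ _ hlen,
      get2_set2_same dp i j (min (10 ^ 9) (get2 dp i (j - 1))) hlen hrow,
      get2_set2_ne dp i j (i - 1) (j - 1) _ hlen (Or.inl (by omega)),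
      set2_set2 dp i j _ _ hlen]
  · simp only [if_neg hlt, hg1]
    rw [get2_set2_ne dp i j (i - 1) (j - 1) _ hlen (Or.inl (by omega)),
      set2_set2 dp i j _ _ hlen]

theorem TabInv_body (t c : List Int) (k s : Nat) (dp : List (List Int))
    (hk : 1 ≤ k) (hkm : k ≤ t.length) (hks : k ≤ s) (hs : s ≤ c.length)
    (h : TabInv t c k s dp) : TabInv t c k (s + 1) (bodyA t c k dp s) := by
  obtain ⟨hL, hR, hG⟩ := h
  have hlen : k < dp.length := by omega
  have hrow : s < (dp.getD k []).length := by rw [hR k hkm]; omega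
  rw [bodyA_eq t c k s dp hk hks hlen hrow]
  have hVeq : min (if k < s then min (10 ^ 9) (get2 dp k (s - 1)) else 10 ^ 9)
      (get2 dp (k - 1) (s - 1) + |t.getD (k - 1) 0 - c.getD (s - 1) 0|) = fB t c k s := by
    obtain ⟨k0, rfl⟩ : ∃ k0, k = k0 + 1 := ⟨k - 1, by omega⟩
    have hdiag : get2 dp (k0 + 1 - 1) (s - 1) = fB t c k0 (s - 1) := by
      by_cases hk0 : k0 = 0
      · subst hk0
        rw [fB_zero]
        rw [hG 0 (s - 1) (by omega) (by omega), if_neg (by omega)]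
      · rw [show k0 + 1 - 1 = k0 from rfl,
          hG k0 (s - 1) (by omega) (by omega), if_pos (by omega)]
    by_cases hlt : k0 + 1 < s
    · have hleft : get2 dp (k0 + 1) (s - 1) = fB t c (k0 + 1) (s - 1) := by
        rw [hG (k0 + 1) (s - 1) hkm (by omega), if_pos (by omega)]
      rw [if_pos hlt, fB_succ, if_neg (show ¬ s < k0 + 1 by omega), hdiag, hleft]
      simp only [Nat.add_sub_cancel]
      rw [min_eq_right (fB_le t c (k0 + 1) (s - 1) (by omega) (by omega))]
    · have hleft9 : fB t c (k0 + 1) (s - 1) = 10 ^ 9 := by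
        rw [fB_succ, if_pos (by omega)]
      rw [if_neg hlt, fB_succ, if_neg (show ¬ s < k0 + 1 by omega), hdiag, hleft9]
      simp only [Nat.add_sub_cancel]
  rw [hVeq]
  refine ⟨by rw [length_set2, hL], ?_, ?_⟩
  · intro i hi
    by_cases hik : k = i
    · subst hik
      rw [row_set2_self dp k s _ hlen, List.length_set]
      exact hR k hi
    · rw [row_set2_ne dp k s i _ hik]
      exact hR i hi
  · intro i j hi hj
    by_cases hij : i = k ∧ j = s
    · obtain ⟨h1, h2⟩ := hij
      subst h1; subst h2
      rw [get2_set2_same dp i j _ hlen (by rw [hR i hi]; omega), if_pos (by omega)]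
    · rw [get2_set2_ne dp k s i j _ hlen (by omega), hG i j hi hj]
      by_cases hc : 1 ≤ i ∧ (i < k ∧ i ≤ j ∨ i = k ∧ i ≤ j ∧ j < s)
      · rw [if_pos hc, if_pos (by omega)]
      · rw [if_neg hc, if_neg (by omega)]

theorem TabInv_inner (t c : List Int) (k : Nat) (hk : 1 ≤ k) (hkm : k ≤ t.length) :
    ∀ (l s : Nat) (dp : List (List Int)), k ≤ s → s + l = c.length + 1 →
      TabInv t c k s dp →
      TabInv t c k (c.length + 1) ((List.range' s l).foldl (bodyA t c k) dp) := by
  intro l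
  induction l with
  | zero =>
    intro s dp _ hsum h
    have : s = c.length + 1 := by omega
    subst this
    simpa using h
  | succ l ih =>
    intro s dp hks hsum h
    rw [List.range'_succ, List.foldl_cons]
    exact ih (s + 1) (bodyA t c k dp s) (by omega) (by omega)
      (TabInv_body t c k s dp hk hkm hks (by omega) h)

theorem TabInv_row_done (t c : List Int) (k : Nat) (dp : List (List Int))
    (h : TabInv t c k (c.length + 1) dp) : TabInv t c (k + 1) (k + 1) dp := by
  obtain ⟨hL, hR, hG⟩ := h
  refine ⟨hL, hR, ?_⟩
  intro i j hi hj
  rw [hG i j hi hj]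
  by_cases hc : 1 ≤ i ∧ (i < k ∧ i ≤ j ∨ i = k ∧ i ≤ j ∧ j < c.length + 1)
  · rw [if_pos hc, if_pos (by omega)]
  · rw [if_neg hc, if_neg (by omega)]

theorem TabInv_row_empty (t c : List Int) (k : Nat) (dp : List (List Int))
    (hn : c.length < k) (h : TabInv t c k k dp) : TabInv t c (k + 1) (k + 1) dp := by
  obtain ⟨hL, hR, hG⟩ := h
  refine ⟨hL, hR, ?_⟩
  intro i j hi hj
  rw [hG i j hi hj]
  by_cases hc : 1 ≤ i ∧ (i < k ∧ i ≤ j ∨ i = k ∧ i ≤ j ∧ j < k)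
  · rw [if_pos hc, if_pos (by omega)]
  · rw [if_neg hc, if_neg (by omega)]

theorem TabInv_outer (t c : List Int) :
    ∀ (l k : Nat) (dp : List (List Int)), 1 ≤ k → k + l = t.length + 1 →
      TabInv t c k k dp →
      TabInv t c (t.length + 1) (t.length + 1)
        ((List.range' k l).foldl
          (fun dp i => (List.range' i (c.length + 1 - i)).foldl (bodyA t c i) dp) dp) := by
  intro l
  induction l with
  | zero =>
    intro k dp hk hsum h
    have : k = t.length + 1 := by omega
    subst this
    simpa using h
  | succ l ih =>
    intro k dp hk hsum h
    rw [List.range'_succ, List.foldl_cons]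
    refine ih (k + 1) _ (by omega) (by omega) ?_
    by_cases hkn : k ≤ c.length
    · exact TabInv_row_done t c k _
        (TabInv_inner t c k hk (by omega) (c.length + 1 - k) k dp (le_refl _) (by omega) h)
    · have h0 : c.length + 1 - k = 0 := by omega
      rw [h0]
      exact TabInv_row_empty t c k dp (by omega) h

theorem TabInv_init (t c : List Int) :
    TabInv t c 1 1 (List.replicate (t.length + 1) (List.replicate (c.length + 1) (0 : Int))) := by
  refine ⟨by simp, ?_, ?_⟩
  · intro i hi
    simp [List.getD, List.getElem?_replicate, Nat.lt_succ_of_le hi]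
  · intro i j hi hj
    rw [if_neg (by omega)]
    simp [get2, List.getD, List.getElem?_replicate, Nat.lt_succ_of_le hi]
    split <;> rfl

theorem A_eq_B (t c : List Int) :
    get2 ((List.range' 1 t.length).foldl
        (fun dp i => (List.range' i (c.length + 1 - i)).foldl (bodyA t c i) dp)
        (List.replicate (t.length + 1) (List.replicate (c.length + 1) (0 : Int))))
      t.length c.length =
    if c.length < t.length then 0 else fB t c t.length c.length := by
  have h := TabInv_outer t c t.length 1 _ (le_refl _) (by omega) (TabInv_init t c)
  have hfin := h.2.2 t.length c.length (le_refl _) (le_refl _)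
  rw [hfin]
  by_cases hmn : c.length < t.length
  · rw [if_neg (by omega), if_pos hmn]
  · by_cases hm0 : t.length = 0
    · rw [if_neg (by omega), if_neg hmn, hm0, fB_zero]
    · rw [if_pos (by omega), if_neg hmn]

-- ===== VERDICT (by name: the statement is the Claim_ definition above) =====
theorem nearness_spec : Claim_equal_nearness := by
  intro target candidate _
  unfold Spec_nearness nearness nearness_alt
  exact A_eq_B (PySem.List.sorted target (fun x => x) false)
    (PySem.List.sorted candidate (fun x => x) false)
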